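/- GENERATED by farm/worked/mk_tree_copies.py from farm/worked/vorbis_decode_packet_rest.16/Proof.lean (a worked proof of the farm's unit `vorbis_decode_packet_rest.16`,
   accepted by the verdict) — do not edit. -/
import Vorbis.Spec.Units.vorbis_decode_packet_rest_16

open X86 X86.User Asan Vorbis Vorbis.Spec Vorbis.Spec.vorbis_decode_packet_rest

/-- Segment 16 of `vorbis_decode_packet_rest` (0x110c44: `return error(f, VORBIS_invalid_stream)` for a floor of type 0) is DEAD
CODE under the invariant: the entry assertion `At16` says some floor of the decoder has type 0 (`dead`), and FL3 of the header's
validation says every floor has type 1. No instruction is walked: the hypotheses about the code and about `error` are not used. -/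
theorem Vorbis.Spec.Worked.vorbis_decode_packet_rest_16_ok : Vorbis.Spec.vorbis_decode_packet_rest_16.Statement := by
  intro Lay _ μ _ u₀ _ _
  intro others frames len Ar stored room mode ysz u ret v a16
  -- the floor whose type the code has just found to be 0
  obtain ⟨fl, hfl, h0⟩ := a16.dead
  -- FL3: its type is 1
  have h1 := (Real.VorbisOK.config a16.toStable.toFrame.inv.fb.vorbis).floor.FL3 fl hfl
  rw [h0] at h1
  exact absurd h1 (by decide)
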